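-- pv_equiv track=rewrite | github.com/Lachimax/pywebofworlds | utils.py | split_csv_row
-- ===== SOURCE A (Python) =====
-- def split_csv_row(row: str, remove: str = None):
--     """
--     Splits a row from a csv file into its component cells, and returns it as a list of strings.
--     :param row: The csv row to be split.
--     :param remove: If specified, this string will be removed from each cell.
--     :return:
--     """
--     cells = []
--     cell = ''
--     for char in row:
--         if char == ',' or char == '\n':
--             if remove is not None:
--                 cell = cell.replace(remove, '')
--             cells.append(cell)
--             cell = ''
--         else:
--             cell += char
--     return cells
-- ===== SOURCE B (Python) =====
-- def split_csv_row(row: str, remove: str = None):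
--     """Split a csv row into cells: one library split over a delimiter-normalised
--     copy, drop the trailing segment, then one optional replace pass."""
--     parts = row.replace('\n', ',').split(',')[:-1]
--     if remove is not None:
--         parts = [cell.replace(remove, '') for cell in parts]
--     return parts
-- ===== Notes on version B (the rewrite author's own statement) =====
-- stated objective: simpler
-- what changed: Replaces A's char-by-char accumulator loop with one delimiter-normalising replace + a single library split, dropping the trailing segment A never emits, then one optional replace pass over the kept cells.
import Mathlib
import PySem

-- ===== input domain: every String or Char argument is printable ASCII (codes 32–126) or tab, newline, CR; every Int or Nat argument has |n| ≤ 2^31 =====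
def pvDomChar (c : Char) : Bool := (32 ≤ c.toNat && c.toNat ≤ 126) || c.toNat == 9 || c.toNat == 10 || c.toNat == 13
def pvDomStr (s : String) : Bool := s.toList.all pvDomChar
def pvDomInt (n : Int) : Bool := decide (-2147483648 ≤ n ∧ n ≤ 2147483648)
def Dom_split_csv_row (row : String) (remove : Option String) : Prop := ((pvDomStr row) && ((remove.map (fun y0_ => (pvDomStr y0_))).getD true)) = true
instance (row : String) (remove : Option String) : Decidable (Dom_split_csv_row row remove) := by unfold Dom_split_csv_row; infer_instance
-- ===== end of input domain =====

-- B replaces A's char-by-char accumulator loop with one replace+split over the row and a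
-- drop of the trailing segment, then an optional replace pass over the kept cells (simpler).


-- ===== PORT A =====
-- cells/cell kept as List Char during the loop (Lean's own String ops are opaque);
-- delimiter test, optional replace before append, and trailing partial cell dropped, as in A.
def split_csv_row (row : String) (remove : Option String) : List String :=
  let st := row.toList.foldl
    (fun (st : List (List Char) × List Char) c =>
      if c = ',' ∨ c = '\n' then
        let cell := match remove with
          | some r => PySem.Chars.replace st.2 r.toList []
          | none => st.2
        (st.1 ++ [cell], [])
      else (st.1, st.2 ++ [c]))
    ([], [])
  st.1.map String.mk

-- ===== PORT B =====
def split_csv_row_alt (row : String) (remove : Option String) : List String :=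
  let parts := (PySem.Chars.splitOn (PySem.Chars.replace row.toList ['\n'] [',']) [',']).dropLast
  match remove with
  | some r => parts.map (fun cs => String.mk (PySem.Chars.replace cs r.toList []))
  | none => parts.map String.mk

-- ===== PRECONDITION & SPEC =====
def Spec_split_csv_row (row : String) (remove : Option String) (out : List String) : Prop := out = split_csv_row_alt row remove
instance (row : String) (remove : Option String) (out : List String) : Decidable (Spec_split_csv_row row remove out) := by unfold Spec_split_csv_row; infer_instance

-- ===== CLAIM (what is proved, stated in full; the proofs are below) =====
def Claim_equal_split_csv_row : Prop := ∀ (row : String) (remove : Option String), Dom_split_csv_row row remove → Spec_split_csv_row row remove (split_csv_row row remove)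

-- ===== LEMMAS AND PROOFS =====

-- reference splitter on ',' only: pvSimple l cur = splitOn-style segments (cur reversed-prefix)
def pvSimple : List Char → List Char → List (List Char)
  | [], cur => [cur.reverse]
  | c :: l, cur => if c = ',' then cur.reverse :: pvSimple l [] else pvSimple l (c :: cur)

-- reference tokenizer matching A's loop shape: completed cells only (last partial dropped)
def pvTok : List Char → List Char → List (List Char)
  | [], _ => []
  | c :: l, cur => if c = ',' then cur :: pvTok l [] else pvTok l (cur ++ [c])

-- result of A's optional per-cell replace
def pvApply (remove : Option String) (cs : List Char) : List Char :=
  match remove with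
  | some r => PySem.Chars.replace cs r.toList []
  | none => cs

lemma replace_go_single (a b : Char) (l acc : List Char) (fuel : Nat) (h : l.length ≤ fuel) :
    PySem.Chars.replace.go [a] [b] fuel l acc
      = acc.reverse ++ l.map (fun c => if c = a then b else c) := by
  induction l generalizing fuel acc with
  | nil => cases fuel <;> simp [PySem.Chars.replace.go]
  | cons c t ih =>
    cases fuel with
    | zero => simp at h
    | succ fuel =>
      simp only [PySem.Chars.replace.go]
      by_cases hc : c = a
      · subst hc
        simp only [List.isPrefixOf, BEq.rfl, Bool.true_and, if_true]
        simp only [List.length_cons, List.length_nil, List.drop_succ_cons, List.drop_zero]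
        rw [ih _ _ (by simpa using Nat.le_of_succ_le_succ h)]
        simp
      · have : ([a].isPrefixOf (c :: t)) = false := by
          simp [List.isPrefixOf, Ne.symm hc]
        rw [this]
        simp only [Bool.false_eq_true, if_false]
        rw [ih _ _ (by simpa using Nat.le_of_succ_le_succ h)]
        simp [hc]

lemma replace_nl (l : List Char) :
    PySem.Chars.replace l ['\n'] [','] = l.map (fun c => if c = '\n' then ',' else c) := by
  simpa using replace_go_single '\n' ',' l [] l.length le_rfl

lemma splitOn_go_comma (l cur : List Char) (acc : List (List Char)) (fuel : Nat) (h : l.length ≤ fuel) :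
    PySem.Chars.splitOn.go [','] fuel l cur acc = acc.reverse ++ pvSimple l cur := by
  induction l generalizing fuel cur acc with
  | nil => cases fuel <;> simp [PySem.Chars.splitOn.go, pvSimple]
  | cons c t ih =>
    cases fuel with
    | zero => simp at h
    | succ fuel =>
      simp only [PySem.Chars.splitOn.go]
      by_cases hc : c = ','
      · subst hc
        simp only [List.isPrefixOf, BEq.rfl, Bool.true_and, if_true]
        simp only [List.length_cons, List.length_nil, List.drop_succ_cons, List.drop_zero]
        rw [ih _ _ _ (by simpa using Nat.le_of_succ_le_succ h)]
        simp [pvSimple]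
      · have : (List.isPrefixOf [','] (c :: t)) = false := by
          simp [List.isPrefixOf, Ne.symm hc]
        rw [this]
        simp only [Bool.false_eq_true, if_false]
        rw [ih _ _ _ (by simpa using Nat.le_of_succ_le_succ h)]
        simp [pvSimple, hc]

lemma splitOn_comma (l : List Char) :
    PySem.Chars.splitOn l [','] = pvSimple l [] := by
  simpa using splitOn_go_comma l [] [] (l.length + 1) (Nat.le_succ _)

lemma pvSimple_ne_nil (l cur : List Char) : pvSimple l cur ≠ [] := by
  induction l generalizing cur with
  | nil => simp [pvSimple]
  | cons c t ih => by_cases hc : c = ',' <;> simp [pvSimple, hc, ih]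

lemma dropLast_pvSimple (l cur : List Char) :
    (pvSimple l cur).dropLast = pvTok l cur.reverse := by
  induction l generalizing cur with
  | nil => simp [pvSimple, pvTok]
  | cons c t ih =>
    by_cases hc : c = ','
    · subst hc
      simp only [pvSimple, pvTok, if_true]
      rw [List.dropLast_cons_of_ne_nil (pvSimple_ne_nil t [])]
      simpa using ih []
    · simp only [pvSimple, pvTok, hc, if_false]
      simpa using ih (c :: cur)

lemma foldA_eq (remove : Option String) (l : List Char) (acc : List (List Char)) (cur : List Char) :
    (l.foldl
      (fun (st : List (List Char) × List Char) c =>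
        if c = ',' ∨ c = '\n' then
          (st.1 ++ [pvApply remove st.2], [])
        else (st.1, st.2 ++ [c]))
      (acc, cur)).1
      = acc ++ (pvTok (l.map (fun c => if c = '\n' then ',' else c)) cur).map (pvApply remove) := by
  induction l generalizing acc cur with
  | nil => simp [pvTok]
  | cons c t ih =>
    by_cases hd : c = ',' ∨ c = '\n'
    · have hm : (if c = '\n' then ',' else c) = ',' := by
        rcases hd with h | h <;> simp [h]
      simp only [List.foldl_cons, List.map_cons, hd, if_true, hm, pvTok]
      rw [ih (acc ++ [pvApply remove cur]) []]
      simp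
    · push Not at hd
      have hm : (if c = '\n' then ',' else c) = c := by simp [hd.2]
      have hne : ¬(c = ',' ∨ c = '\n') := by simp [hd.1, hd.2]
      simp only [List.foldl_cons, List.map_cons, hm]
      rw [if_neg hne]
      simp only [pvTok, hd.1, if_false]
      exact ih acc (cur ++ [c])

-- ===== VERDICT (by name: the statement is the Claim_ definition above) =====
theorem split_csv_row_spec : Claim_equal_split_csv_row := by
  intro row remove _
  show split_csv_row row remove = split_csv_row_alt row remove
  have hA := foldA_eq remove row.toList [] []
  simp only [pvApply] at hA
  simp only [split_csv_row, split_csv_row_alt]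
  rw [hA, replace_nl, splitOn_comma, dropLast_pvSimple]
  cases remove with
  | none => simp [pvApply]
  | some r => simp [pvApply]
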